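-- pv_equiv track=rewrite | github.com/rahulratnani/FlaskAPI | env/Lib/site-packages/union/_config.py | _clean_endpoint
-- ===== SOURCE A (Python) =====
-- def _clean_endpoint(endpoint: str) -> str:
--     """Clean endpoint."""
--     prefixes = ("dns:///", "http://", "https://")
--
--     for prefix in prefixes:
--         if endpoint.startswith(prefix):
--             n_prefix = len(prefix)
--             endpoint = endpoint[n_prefix:]
--             break
--
--     return endpoint.rstrip("/")
-- ===== SOURCE B (Python) =====
-- def _clean_endpoint(endpoint: str) -> str:
--     """Clean endpoint."""
--     scheme, sep, rest = endpoint.partition("://")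
--     if sep:
--         if scheme in ("http", "https"):
--             endpoint = rest
--         elif scheme == "dns" and rest.startswith("/"):
--             endpoint = rest[1:]
--     return endpoint.rstrip("/")
-- ===== Notes on version B (the rewrite author's own statement) =====
-- stated objective: alternative
-- what changed: Replaces A's iterate-over-three-prefixes-and-break loop by a single partition of the string at its first "://" followed by a dispatch on the scheme and a check for dns's extra slash, then the same rstrip('/').
import Mathlib
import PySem

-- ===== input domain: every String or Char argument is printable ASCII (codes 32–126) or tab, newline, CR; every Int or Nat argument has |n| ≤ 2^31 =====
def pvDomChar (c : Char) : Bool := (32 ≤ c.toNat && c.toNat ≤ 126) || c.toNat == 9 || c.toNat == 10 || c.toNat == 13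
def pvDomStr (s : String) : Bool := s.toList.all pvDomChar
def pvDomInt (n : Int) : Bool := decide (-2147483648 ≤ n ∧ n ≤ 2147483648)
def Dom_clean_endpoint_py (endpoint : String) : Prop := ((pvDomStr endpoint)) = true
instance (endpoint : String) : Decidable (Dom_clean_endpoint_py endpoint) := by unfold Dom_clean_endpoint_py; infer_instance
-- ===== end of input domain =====

-- B replaces A's iterate-prefixes-and-break loop by one partition at the first "://" followed by a dispatch on the scheme (simpler, no loop).

-- shared hand port of str.rstrip("/") (PySem has no rstrip-with-chars): exact — drops exactly the trailing run of '/'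
def pyRstripSlash (cs : List Char) : List Char :=
  (cs.reverse.dropWhile (fun c => c == '/')).reverse

-- ===== PORT A =====
-- the for-loop over prefixes with break: first matching prefix is stripped, then the loop exits
def aStrip : List (List Char) → List Char → List Char
  | [], e => e
  | p :: ps, e =>
    if PySem.Chars.startswith e p then e.drop p.length
    else aStrip ps e

def clean_endpoint_py (endpoint : String) : String :=
  String.ofList (pyRstripSlash (aStrip
    [['d','n','s',':','/','/','/'], ['h','t','t','p',':','/','/'], ['h','t','t','p','s',':','/','/']]
    endpoint.toList))

-- ===== PORT B =====
-- endpoint.partition("://") = (cs.take i, "://", cs.drop (i+3)) at the first occurrence i = find cs "://" (sep empty iff find = -1);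
-- bDispatch is B's if-chain on (scheme, rest), with scheme = cs.take i.toNat and rest = cs.drop (i.toNat+3) inlined; rest[1:] = drop 1
def bDispatch (cs : List Char) (i : Int) : List Char :=
  if i = -1 then cs
  else if cs.take i.toNat = ['h','t','t','p'] ∨ cs.take i.toNat = ['h','t','t','p','s'] then
    cs.drop (i.toNat + 3)
  else if cs.take i.toNat = ['d','n','s'] ∧ PySem.Chars.startswith (cs.drop (i.toNat + 3)) ['/'] then
    (cs.drop (i.toNat + 3)).drop 1
  else cs

def clean_endpoint_py_alt (endpoint : String) : String :=
  String.ofList (pyRstripSlash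
    (bDispatch endpoint.toList (PySem.Chars.find endpoint.toList [':','/','/'])))

-- ===== PRECONDITION & SPEC =====
def Spec_clean_endpoint_py (endpoint : String) (out : String) : Prop := out = clean_endpoint_py_alt endpoint
instance (endpoint : String) (out : String) : Decidable (Spec_clean_endpoint_py endpoint out) := by unfold Spec_clean_endpoint_py; infer_instance

-- ===== CLAIM (what is proved, stated in full; the proofs are below) =====
def Claim_equal_clean_endpoint_py : Prop := ∀ (endpoint : String), Dom_clean_endpoint_py endpoint → Spec_clean_endpoint_py endpoint (clean_endpoint_py endpoint)

-- ===== LEMMAS AND PROOFS =====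

-- find points at the first occurrence: the converse direction of Chars.find_spec
theorem find_eq_coe (cs sub : List Char) (k : Nat)
    (h1 : sub <+: cs.drop k) (h2 : ∀ i, i < k → ¬ sub <+: cs.drop i) :
    PySem.Chars.find cs sub = (k : Int) := by
  have hin : sub <:+: cs := h1.isInfix.trans (List.drop_suffix k cs).isInfix
  have hpos : 0 ≤ PySem.Chars.find cs sub := (PySem.Chars.find_nonneg_iff cs sub).2 hin
  obtain ⟨hs1, hs2⟩ := PySem.Chars.find_spec hpos
  rcases lt_trichotomy (PySem.Chars.find cs sub).toNat k with h | h | h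
  · exact absurd hs1 (h2 _ h)
  · omega
  · exact absurd h1 (hs2 k h)

-- the heart of the equivalence, stated over the character list
theorem strip_eq_dispatch (cs : List Char) :
    aStrip [['d','n','s',':','/','/','/'], ['h','t','t','p',':','/','/'], ['h','t','t','p','s',':','/','/']] cs
      = bDispatch cs (PySem.Chars.find cs [':','/','/']) := by
  by_cases h1 : PySem.Chars.startswith cs ['d','n','s',':','/','/','/'] = true
  · obtain ⟨t, ht⟩ := (PySem.Chars.startswith_iff cs _).1 h1
    subst ht
    have hfind : PySem.Chars.find (['d','n','s',':','/','/','/'] ++ t) [':','/','/'] = (3 : Int) := by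
      apply find_eq_coe
      · simp
      · intro i hi hpre
        interval_cases i <;> simp_all [List.cons_prefix_cons]
    rw [hfind]
    simp [aStrip, bDispatch, PySem.Chars.startswith]
  · by_cases h2 : PySem.Chars.startswith cs ['h','t','t','p',':','/','/'] = true
    · obtain ⟨t, ht⟩ := (PySem.Chars.startswith_iff cs _).1 h2
      subst ht
      have hfind : PySem.Chars.find (['h','t','t','p',':','/','/'] ++ t) [':','/','/'] = (4 : Int) := by
        apply find_eq_coe
        · simp
        · intro i hi hpre
          interval_cases i <;> simp_all [List.cons_prefix_cons]
      rw [hfind]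
      simp [aStrip, bDispatch, PySem.Chars.startswith]
    · by_cases h3 : PySem.Chars.startswith cs ['h','t','t','p','s',':','/','/'] = true
      · obtain ⟨t, ht⟩ := (PySem.Chars.startswith_iff cs _).1 h3
        subst ht
        have hfind : PySem.Chars.find (['h','t','t','p','s',':','/','/'] ++ t) [':','/','/'] = (5 : Int) := by
          apply find_eq_coe
          · simp
          · intro i hi hpre
            interval_cases i <;> simp_all [List.cons_prefix_cons]
        rw [hfind]
        simp [aStrip, bDispatch, PySem.Chars.startswith]
      · -- no prefix matches: A leaves cs unchanged, and no dispatch branch of B can fire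
        simp only [aStrip, h1, h2, h3, if_false, Bool.false_eq_true]
        by_cases hf : PySem.Chars.find cs [':','/','/'] = -1
        · simp [bDispatch, hf]
        · have hpos : 0 ≤ PySem.Chars.find cs [':','/','/'] := by
            have := PySem.Chars.neg_one_le_find cs [':','/','/']
            omega
          obtain ⟨hs1, _⟩ := PySem.Chars.find_spec hpos
          set k := (PySem.Chars.find cs [':','/','/']).toNat with hk
          obtain ⟨u, hu⟩ := hs1
          have hu' : u = cs.drop (k + 3) := by
            have := congrArg (List.drop 3) hu
            simpa [List.drop_drop, Nat.add_comm] using this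
          have hsplit : cs = cs.take k ++ ([':','/','/'] ++ cs.drop (k + 3)) := by
            conv_lhs => rw [← List.take_append_drop k cs]
            rw [← hu, hu']
          unfold bDispatch
          rw [if_neg hf, if_neg, if_neg]
          · rintro ⟨hd, hslash⟩
            obtain ⟨v, hv⟩ := (PySem.Chars.startswith_iff _ _).1 hslash
            apply h1
            rw [PySem.Chars.startswith_iff]
            refine ⟨v, ?_⟩
            conv_rhs => rw [hsplit, hd, ← hv]
            simp
          · rintro (hd | hd)
            · apply h2
              rw [PySem.Chars.startswith_iff]
              refine ⟨cs.drop (k + 3), ?_⟩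
              conv_rhs => rw [hsplit, hd]
              simp
            · apply h3
              rw [PySem.Chars.startswith_iff]
              refine ⟨cs.drop (k + 3), ?_⟩
              conv_rhs => rw [hsplit, hd]
              simp

theorem clean_endpoint_py_spec : Claim_equal_clean_endpoint_py := by
  intro endpoint _
  unfold Spec_clean_endpoint_py clean_endpoint_py clean_endpoint_py_alt
  rw [strip_eq_dispatch]
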